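-- pv_equiv track=rewrite | github.com/lobis/root | bindings/pyroot/pythonizations/python/ROOT/_pythonization/_rdf_utils.py | _is_ragged
-- ===== SOURCE A (Python) =====
-- from typing import Iterable
--
-- def _is_ragged(iterable: Iterable) -> bool:
--     """
--     Check if the given iterable is ragged.
--     """
--     # TODO: Handle array of arrays... etc.
--     try:
--         iterable_length = len(iterable)
--     except TypeError:
--         return True
--
--     if iterable_length == 0:
--         return False
--
--     first_length = None
--     for item in iterable:
--         # iterable may not support indexing
--         first_length = len(item)
--         break
--
--     if all(len(item) == first_length for item in iterable):
--         return False
--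
--     return True
-- ===== SOURCE B (Python) =====
-- def _is_ragged(iterable) -> bool:
--     try:
--         len(iterable)
--     except TypeError:
--         return True
--     lengths = {len(item) for item in iterable}
--     return len(lengths) > 1
-- ===== Notes on version B (the rewrite author's own statement) =====
-- stated objective: simpler
-- what changed: Instead of grabbing the first item's length and scanning with all(), B collects the distinct item lengths into a set in one comprehension and returns whether more than one length occurs.
import Mathlib
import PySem

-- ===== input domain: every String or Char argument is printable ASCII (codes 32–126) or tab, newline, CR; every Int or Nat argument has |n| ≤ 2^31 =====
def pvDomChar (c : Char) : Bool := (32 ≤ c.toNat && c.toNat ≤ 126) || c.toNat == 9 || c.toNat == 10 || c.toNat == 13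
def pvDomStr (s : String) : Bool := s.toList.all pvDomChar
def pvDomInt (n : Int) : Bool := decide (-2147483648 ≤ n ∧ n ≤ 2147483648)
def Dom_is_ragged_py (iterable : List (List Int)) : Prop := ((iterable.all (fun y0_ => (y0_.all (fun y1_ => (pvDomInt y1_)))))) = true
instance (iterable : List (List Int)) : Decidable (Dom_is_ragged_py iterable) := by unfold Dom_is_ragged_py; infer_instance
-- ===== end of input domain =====

-- B replaces A's "remember the first item's length and scan with all()" by collecting the
-- distinct item lengths into a set and testing whether more than one occurs (simpler).
-- On `List (List Int)` the Python `len()` calls never raise, so both are total (the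
-- try/except TypeError guard of the Python sources is unreachable on this domain).

-- ===== PORT A =====
def is_ragged_py (iterable : List (List Int)) : Bool :=
  -- len(iterable) always succeeds on a list, so the except-branch is not reachable
  let iterable_length := iterable.length
  if iterable_length = 0 then false
  else
    -- for item in iterable: first_length = len(item); break
    let first_length : Option Int :=
      match iterable with
      | [] => none
      | item :: _ => some ((item.length : Int))
    if iterable.all (fun item => some ((item.length : Int)) == first_length) then false
    else true

-- ===== PORT B =====
def is_ragged_py_alt (iterable : List (List Int)) : Bool :=
  let lengths : PySem.Set Int := PySem.Set.ofList (iterable.map (fun item => (item.length : Int)))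
  decide (PySem.Set.len lengths > 1)

-- ===== PRECONDITION & SPEC =====
def Spec_is_ragged_py (iterable : List (List Int)) (out : Bool) : Prop := out = is_ragged_py_alt iterable
instance (iterable : List (List Int)) (out : Bool) : Decidable (Spec_is_ragged_py iterable out) := by unfold Spec_is_ragged_py; infer_instance

-- ===== CLAIM (what is proved, stated in full; the proofs are below) =====
def Claim_equal_is_ragged_py : Prop := ∀ (iterable : List (List Int)), Dom_is_ragged_py iterable → Spec_is_ragged_py iterable (is_ragged_py iterable)

-- ===== LEMMAS AND PROOFS =====

-- a Nodup list whose members all equal x has at most one element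
theorem pv_nodup_const_len {α : Type} (s : List α) (x : α) (hn : s.Nodup)
    (h : ∀ y ∈ s, y = x) : s.length ≤ 1 := by
  match s with
  | [] => simp
  | a :: t =>
    match t with
    | [] => simp
    | b :: t' =>
      exfalso
      have ha := h a (by simp)
      have hb := h b (by simp)
      rw [List.nodup_cons] at hn
      exact hn.1 (by simp [ha, hb])

-- the distinct lengths collapse to one element iff every length equals the first
theorem pv_key (x : List Int) (xs : List (List Int)) :
    ((PySem.Set.ofList ((x :: xs).map (fun item => (item.length : Int)))).length ≤ 1) ↔
    (∀ y ∈ xs, (y.length : Int) = (x.length : Int)) := by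
  constructor
  · intro h y hy
    have hxmem : (x.length : Int) ∈ PySem.Set.ofList ((x :: xs).map (fun item => (item.length : Int))) := by
      rw [PySem.Set.mem_ofList]; simp
    have hymem : (y.length : Int) ∈ PySem.Set.ofList ((x :: xs).map (fun item => (item.length : Int))) := by
      rw [PySem.Set.mem_ofList]; simp; right; exact ⟨y, hy, rfl⟩
    match hseq : PySem.Set.ofList ((x :: xs).map (fun item => (item.length : Int))) with
    | [] => rw [hseq] at hxmem; simp at hxmem
    | [z] =>
      rw [hseq] at hxmem hymem
      simp at hxmem hymem; rw [hxmem, hymem]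
    | a :: b :: t => rw [hseq] at h; simp at h
  · intro h
    apply pv_nodup_const_len _ ((x.length : Int)) (PySem.Set.nodup_ofList _)
    intro y hy
    rw [PySem.Set.mem_ofList] at hy
    simp at hy
    rcases hy with h1 | ⟨z, hz, h2⟩
    · exact_mod_cast h1
    · rw [← h2]; exact h z hz

-- ===== VERDICT (by name: the statement is the Claim_ definition above) =====
theorem is_ragged_py_spec : Claim_equal_is_ragged_py := by
  intro iterable _
  unfold Spec_is_ragged_py is_ragged_py is_ragged_py_alt
  match iterable with
  | [] => rfl
  | x :: xs =>
    rw [if_neg (by simp : ¬ ((x :: xs).length = 0))]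
    have hkey := pv_key x xs
    by_cases hall : ∀ y ∈ xs, (y.length : Int) = (x.length : Int)
    · have h1 : (x :: xs).all (fun item => some ((item.length : Int)) == some ((x.length : Int))) = true := by
        simp only [List.all_eq_true, beq_iff_eq, Option.some.injEq]
        intro y hy
        rcases List.mem_cons.1 hy with h | h
        · rw [h]
        · exact hall y h
      rw [if_pos h1]
      have hle := hkey.2 hall
      have h2 : ¬ (PySem.Set.len (PySem.Set.ofList ((x :: xs).map (fun item => (item.length : Int)))) > 1) := by
        simp only [PySem.Set.len]; omega
      exact (decide_eq_false h2).symm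
    · have h1 : ¬ ((x :: xs).all (fun item => some ((item.length : Int)) == some ((x.length : Int))) = true) := by
        simp only [List.all_eq_true, beq_iff_eq, Option.some.injEq]
        intro hc
        exact hall (fun y hy => hc y (List.mem_cons_of_mem _ hy))
      have hnle : ¬ ((PySem.Set.ofList ((x :: xs).map (fun item => (item.length : Int)))).length ≤ 1) :=
        fun hc => hall (hkey.1 hc)
      rw [if_neg h1]
      have h2 : PySem.Set.len (PySem.Set.ofList ((x :: xs).map (fun item => (item.length : Int)))) > 1 := by
        simp only [PySem.Set.len]; omega
      exact (decide_eq_true h2).symm
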